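-- pv_equiv track=rewrite | github.com/lkwinta/wdi | Workspace/Zestaw_2/zad5.py | wytnij
-- ===== SOURCE A (Python) =====
-- def wytnij(n : int, maska : int):
--     wynik = 0
--     i = 0
--     while n != 0:
--         if maska % 2 == 1:
--             wynik += n%10 * 10**i
--             i += 1
--
--         maska //= 2
--         n //= 10
--
--     return wynik
-- ===== SOURCE B (Python) =====
-- def wytnij(n: int, maska: int):
--     # Collect the selected digits low-to-high, then rebuild the number
--     # with a Horner fold over the reversed list.
--     digits = []
--     while n != 0:
--         if maska % 2 == 1:
--             digits.append(n % 10)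
--         maska //= 2
--         n //= 10
--     wynik = 0
--     for d in reversed(digits):
--         wynik = wynik * 10 + d
--     return wynik
-- ===== Notes on version B (the rewrite author's own statement) =====
-- stated objective: alternative
-- what changed: A builds the result inside the digit loop by positional accumulation (wynik += n%10 * 10**i with a selected-digit counter i); B instead collects the selected digits into a list in one pass and reconstructs the integer afterwards with a Horner fold over the reversed list, eliminating the power computation and the position counter.
import Mathlib
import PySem

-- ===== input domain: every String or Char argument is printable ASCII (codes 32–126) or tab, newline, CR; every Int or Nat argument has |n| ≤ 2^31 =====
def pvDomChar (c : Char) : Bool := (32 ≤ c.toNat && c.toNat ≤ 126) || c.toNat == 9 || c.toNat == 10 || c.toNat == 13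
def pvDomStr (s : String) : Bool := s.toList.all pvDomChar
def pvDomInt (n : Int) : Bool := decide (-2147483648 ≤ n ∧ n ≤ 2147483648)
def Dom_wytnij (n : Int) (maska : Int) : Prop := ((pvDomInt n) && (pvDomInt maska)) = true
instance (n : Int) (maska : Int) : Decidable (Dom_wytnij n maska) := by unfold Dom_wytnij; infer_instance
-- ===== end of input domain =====

-- B collects the mask-selected digits into a list in one pass and rebuilds the
-- integer with a Horner fold over the reversed list, instead of A's in-loop
-- positional accumulation with 10**i.  (On n < 0 both Pythons' identical
-- 'while n != 0' loops never terminate; both ports return the accumulator there.)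


-- ===== PORT A =====
-- the 'while n != 0' loop; the guard is written 'n ≤ 0' so the Lean function is
-- total — for n < 0 the Python loop diverges, and those inputs are outside Pre_.
def wytnijLoopA (n maska wynik : Int) (i : Nat) : Int :=
  if _h : n ≤ 0 then wynik
  else if PySem.Int.mod maska 2 = 1 then
    wytnijLoopA (PySem.Int.floordiv n 10) (PySem.Int.floordiv maska 2)
      (wynik + PySem.Int.mod n 10 * 10 ^ i) (i + 1)
  else
    wytnijLoopA (PySem.Int.floordiv n 10) (PySem.Int.floordiv maska 2) wynik i
termination_by n.toNat
decreasing_by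
  all_goals
    have h1 : PySem.Int.floordiv n 10 < n := by
      rw [PySem.Int.floordiv_lt_iff_lt_mul (by omega)]; omega
    omega

def wytnij (n : Int) (maska : Int) : Int := wytnijLoopA n maska 0 0

-- ===== PORT B =====
-- pass 1 of Source B: the same while loop, appending each selected digit
def wytnijDigits (n maska : Int) : List Int :=
  if _h : n ≤ 0 then []
  else
    (if PySem.Int.mod maska 2 = 1 then [PySem.Int.mod n 10] else []) ++
      wytnijDigits (PySem.Int.floordiv n 10) (PySem.Int.floordiv maska 2)
termination_by n.toNat
decreasing_by
  all_goals
    have h1 : PySem.Int.floordiv n 10 < n := by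
      rw [PySem.Int.floordiv_lt_iff_lt_mul (by omega)]; omega
    omega

-- pass 2 of Source B: 'for d in reversed(digits): wynik = wynik*10 + d'
def wytnij_alt (n : Int) (maska : Int) : Int :=
  (wytnijDigits n maska).reverse.foldl (fun r d => r * 10 + d) 0

-- ===== PRECONDITION & SPEC =====
def Spec_wytnij (n : Int) (maska : Int) (out : Int) : Prop := out = wytnij_alt n maska
instance (n : Int) (maska : Int) (out : Int) : Decidable (Spec_wytnij n maska out) := by unfold Spec_wytnij; infer_instance

-- ===== CLAIM (what is proved, stated in full; the proofs are below) =====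
def Claim_equal_wytnij : Prop := ∀ (n : Int) (maska : Int), Dom_wytnij n maska → Spec_wytnij n maska (wytnij n maska)

-- ===== LEMMAS AND PROOFS =====
def pvHorner (l : List Int) : Int := l.reverse.foldl (fun r d => r * 10 + d) 0

theorem pvHorner_cons (d : Int) (l : List Int) :
    pvHorner (d :: l) = pvHorner l * 10 + d := by
  simp [pvHorner, List.foldl_append]

theorem wytnijLoopA_eq (k : Nat) (n maska wynik : Int) (i : Nat) (h : n.toNat ≤ k) :
    wytnijLoopA n maska wynik i = wynik + pvHorner (wytnijDigits n maska) * 10 ^ i := by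
  induction k generalizing n maska wynik i with
  | zero =>
    have hn : n ≤ 0 := by omega
    rw [wytnijLoopA, wytnijDigits]
    simp [hn, pvHorner]
  | succ k ih =>
    by_cases hn : n ≤ 0
    · rw [wytnijLoopA, wytnijDigits]; simp [hn, pvHorner]
    · have hlt : (PySem.Int.floordiv n 10).toNat ≤ k := by
        have h1 : PySem.Int.floordiv n 10 < n := by
          rw [PySem.Int.floordiv_lt_iff_lt_mul (by omega)]; omega
        have h2 : (0:Int) ≤ PySem.Int.floordiv n 10 := by
          rw [PySem.Int.le_floordiv_iff_mul_le (by omega)]; omega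
        omega
      rw [wytnijLoopA, wytnijDigits]
      by_cases hm : PySem.Int.mod maska 2 = 1
      · rw [dif_neg hn, dif_neg hn, if_pos hm, if_pos hm, List.singleton_append]
        rw [ih _ _ _ _ hlt, pvHorner_cons]
        ring
      · rw [dif_neg hn, dif_neg hn, if_neg hm, if_neg hm, List.nil_append]
        rw [ih _ _ _ _ hlt]

-- ===== VERDICT (by name: the statement is the Claim_ definition above) =====
theorem wytnij_spec : Claim_equal_wytnij := by
  intro n maska _
  unfold Spec_wytnij wytnij wytnij_alt
  rw [wytnijLoopA_eq n.toNat n maska 0 0 (le_refl _)]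
  simp [pvHorner]
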